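-- pv_equiv track=rewrite | github.com/advaithasabnis/advent-of-code | advent_of_code/year2020/day17/shared.py | find_final_state
-- ===== SOURCE A (Python) =====
-- import operator
-- from collections import defaultdict
-- from itertools import product
--
-- def parse_state(data, dimensions=3):
--     s = set()
--     for x, line in enumerate(data):
--         for y, char in enumerate(line):
--             if char == '#':
--                 s.add((x, y) + (0,) * (dimensions - 2))
--     return s
--
-- def find_final_state(data, cycles=6, dimensions=3):
--     grid = parse_state(data, dimensions)
--     directions = [d for d in product([-1, 0, 1], repeat=dimensions)]
--     directions.remove((0,) * dimensions)
--     for _ in range(cycles):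
--         new_grid = set()
--         inactives = defaultdict(int)
--         for coords in grid:
--             count = 0
--             for delta in directions:
--                 if (neighbour := tuple(map(operator.add, coords, delta))) in grid:
--                     count += 1
--                 else:
--                     inactives[neighbour] += 1
--             if count in (2, 3):
--                 new_grid.add(coords)
--         for coords, n_count in inactives.items():
--             if n_count == 3:
--                 new_grid.add(coords)
--         grid = new_grid.copy()
--
--     return grid
-- ===== SOURCE B (Python) =====
-- import operator
-- from itertools import product, groupby
--
--
-- def parse_state(data, dimensions=3):
--     s = set()
--     for x, line in enumerate(data):
--         for y, char in enumerate(line):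
--             if char == '#':
--                 s.add((x, y) + (0,) * (dimensions - 2))
--     return s
--
--
-- def find_final_state(data, cycles=6, dimensions=3):
--     grid = parse_state(data, dimensions)
--     offsets = [d for d in product([-1, 0, 1], repeat=dimensions) if any(d)]
--     for _ in range(cycles):
--         # candidate cells: every active cell and every cell next to one
--         candidates = set(grid)
--         for c in grid:
--             for d in offsets:
--                 candidates.add(tuple(map(operator.add, c, d)))
--         # count votes by SORTING the multiset of neighbour keys and collapsing
--         # the runs of equal keys (no tallying during the generation pass)
--         keys = sorted(tuple(map(operator.add, c, d))
--                       for c in grid for d in offsets)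
--         votes = {k: sum(1 for _ in g) for k, g in groupby(keys)}
--         # uniform rule over the candidates
--         grid = {k for k in candidates
--                 if (n := votes.get(k, 0)) == 3 or (n == 2 and k in grid)}
--     return grid
-- ===== Notes on version B (the rewrite author's own statement) =====
-- stated objective: alternative
-- what changed: B counts neighbour votes by SORTING instead of tallying: it generates the flat multiset of neighbour keys, sorts it and collapses the runs of equal keys (itertools.groupby) into counts, then filters the candidate cells (active cells plus their neighbours) with the uniform rule n==3 or (n==2 and alive) -- replacing A's inline per-cell active-neighbour counter, 'inactives' defaultdict tally and second harvesting pass.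
import Mathlib
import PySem

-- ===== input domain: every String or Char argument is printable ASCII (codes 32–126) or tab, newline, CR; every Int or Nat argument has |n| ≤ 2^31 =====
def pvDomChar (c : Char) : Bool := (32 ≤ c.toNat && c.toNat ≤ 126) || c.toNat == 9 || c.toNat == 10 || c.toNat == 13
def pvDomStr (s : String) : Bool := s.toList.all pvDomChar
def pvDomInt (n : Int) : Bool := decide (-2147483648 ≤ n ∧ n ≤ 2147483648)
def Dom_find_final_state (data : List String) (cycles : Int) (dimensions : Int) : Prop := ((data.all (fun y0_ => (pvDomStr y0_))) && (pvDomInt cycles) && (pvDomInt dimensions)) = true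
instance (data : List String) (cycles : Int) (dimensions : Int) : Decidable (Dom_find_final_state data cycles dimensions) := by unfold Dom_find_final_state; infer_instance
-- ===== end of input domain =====

-- B counts by SORTING instead of tallying: it sorts the multiset of neighbour keys, collapses the
-- runs of equal keys (groupby) into counts, and filters the candidate cells (active ∪ neighbours)
-- with the uniform rule n==3 or (n==2 and alive) — replacing A's inline per-cell counter plus
-- 'inactives' defaultdict plus second harvesting pass; an alternative of the same output.


-- ===== PORT A =====

-- tuple(map(operator.add, coords, delta)) — map over two iterables stops at the shorter one,
-- exactly List.zipWith
def pvAdd (c d : List Int) : List Int := List.zipWith (· + ·) c d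

-- list(itertools.product([-1, 0, 1], repeat=n)) : leftmost coordinate varies slowest
def pvProduct (pool : List Int) : Nat → List (List Int)
  | 0 => [[]]
  | n + 1 => pool.flatMap (fun x => (pvProduct pool n).map (x :: ·))

-- Python's dict, ported exactly (insertion order, value overwrite in place, first-occurrence key
-- order) but with a hash index in place of a linear key scan, so the port evaluates fast;
-- getD / keys / items are the Python dict's lookup, key view and item view
structure PvDict where
  revKeys : List (List Int)            -- the keys, most recently added first
  idx : Std.HashMap (List Int) Int     -- key -> current value

def PvDict.empty : PvDict := ⟨[], ∅⟩

-- d[k] = f(d.get(k, dflt)), i.e. 'd[nb] += 1' on a defaultdict(int): an existing key keeps its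
-- position and gets the new value, a new key goes to the end of the insertion order
def PvDict.modify (d : PvDict) (k : List Int) (dflt : Int) (f : Int → Int) : PvDict :=
  match d.idx[k]? with
  | some v => ⟨d.revKeys, d.idx.insert k (f v)⟩
  | none => ⟨k :: d.revKeys, d.idx.insert k (f dflt)⟩

def PvDict.items (d : PvDict) : List (List Int × Int) :=
  d.revKeys.reverse.map (fun k => (k, d.idx.getD k 0))

def PvDict.getD (d : PvDict) (k : List Int) (dflt : Int) : Int := d.idx.getD k dflt

-- d[k] = v: an existing key keeps its position, a new key goes to the end
def PvDict.insert (d : PvDict) (k : List Int) (v : Int) : PvDict :=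
  match d.idx[k]? with
  | some _ => ⟨d.revKeys, d.idx.insert k v⟩
  | none => ⟨k :: d.revKeys, d.idx.insert k v⟩

-- Python's set, ported exactly (distinct elements in insertion order) but with a hash index in
-- place of a linear membership scan, so the port evaluates fast
structure PvSet where
  revElems : List (List Int)           -- the elements, most recently added first
  idx : Std.HashMap (List Int) Unit    -- membership index

def PvSet.add (s : PvSet) (x : List Int) : PvSet :=
  match s.idx[x]? with
  | some _ => s
  | none => ⟨x :: s.revElems, s.idx.insert x ()⟩

def PvSet.ofList (l : List (List Int)) : PvSet := l.foldl PvSet.add ⟨[], ∅⟩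

def PvSet.toList (s : PvSet) : List (List Int) := s.revElems.reverse

-- helper parse_state (shared by both Pythons verbatim): (x, y) + (0,)*(dimensions-2);
-- a negative repeat count gives the empty tuple, exactly Int.toNat's clamping
def parse_state (data : List String) (dimensions : Int) : PySem.Set (List Int) :=
  (PySem.List.enumerate data 0).foldl (fun s p =>
    (PySem.List.enumerate p.2.toList 0).foldl (fun s q =>
      if q.2 = '#' then
        PySem.Set.add s ([p.1, q.1] ++ List.replicate (dimensions - 2).toNat 0)
      else s) s)
    PySem.Set.empty

def find_final_state (data : List String) (cycles : Int) (dimensions : Int) : List (List Int) :=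
  let grid0 := parse_state data dimensions
  -- directions.remove((0,)*dimensions): removal of the first occurrence; Python raises
  -- ValueError when dimensions < 0 (negative repeat) — excluded by Pre_; the none branch is unreachable
  let directions :=
    match PySem.List.remove? (pvProduct [-1, 0, 1] dimensions.toNat)
        (List.replicate dimensions.toNat (0 : Int)) with
    | some l => l
    | none => []
  (PySem.List.pyRange 0 cycles 1).foldl (fun grid _ =>
    let res := grid.foldl
      (fun (st : PySem.Set (List Int) × PvDict) coords =>
        let r := directions.foldl
          (fun (p : Int × PvDict) delta =>
            let nb := pvAdd coords delta
            if PySem.Set.contains grid nb then (p.1 + 1, p.2)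
            else (p.1, p.2.modify nb 0 (· + 1)))
          ((0 : Int), st.2)
        (if r.1 = 2 ∨ r.1 = 3 then PySem.Set.add st.1 coords else st.1, r.2))
      (PySem.Set.empty, PvDict.empty)
    res.2.items.foldl (fun ng kv => if kv.2 = 3 then PySem.Set.add ng kv.1 else ng) res.1)
    grid0

-- ===== PORT B =====

-- Python's tuple comparison (lexicographic, shorter prefix first), as the Bool comparator
-- that Source B's sorted() orders the neighbour keys by
def lexLe : List Int → List Int → Bool
  | [], _ => true
  | _ :: _, [] => false
  | a :: as, b :: bs => decide (a < b) || (a == b && lexLe as bs)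

-- itertools.groupby on a list, keeping each run's key with the run length
-- (the pairs of Source B's '{k: sum(1 for _ in g) for k, g in groupby(keys)}'; tail-recursive)
def pyGroupLensAux : List (List Int) → List (List Int × Int) → List (List Int × Int)
  | [], acc => acc.reverse
  | x :: xs, acc =>
    pyGroupLensAux (xs.dropWhile (fun y => y == x))
      ((x, 1 + ((xs.takeWhile (fun y => y == x)).length : Int)) :: acc)
  termination_by l => l.length
  decreasing_by
    simp only [List.length_cons]
    exact Nat.lt_succ_of_le (List.length_dropWhile_le _ _)

def pyGroupLens (l : List (List Int)) : List (List Int × Int) := pyGroupLensAux l []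

def find_final_state_alt (data : List String) (cycles : Int) (dimensions : Int) : List (List Int) :=
  let grid0 := parse_state data dimensions
  let directions :=
    (pvProduct [-1, 0, 1] dimensions.toNat).filter (fun d => d.any (fun x => !(x == 0)))
  (PySem.List.pyRange 0 cycles 1).foldl (fun grid _ =>
    let candidates := grid.foldl
      (fun (s : PvSet) c =>
        directions.foldl (fun (s : PvSet) d => PvSet.add s (pvAdd c d)) s)
      (PvSet.ofList grid)
    -- keys = sorted(...): the built-in sort, ported as mergeSort with the tuple comparator
    let keys := (grid.flatMap (fun c => directions.map (pvAdd c))).mergeSort lexLe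
    -- votes = {k: sum(1 for _ in g) for k, g in groupby(keys)}
    let votes := (pyGroupLens keys).foldl
      (fun (d : PvDict) p => d.insert p.1 p.2) PvDict.empty
    PySem.Set.ofList (candidates.toList.filter (fun k =>
      votes.getD k 0 == 3 ||
      (votes.getD k 0 == 2 && PySem.Set.contains grid k))))
    grid0

-- ===== PRECONDITION & SPEC =====
-- Python A raises ValueError (negative repeat for itertools.product) when dimensions < 0; B raises there too.
def Pre_find_final_state (data : List String) (cycles : Int) (dimensions : Int) : Prop :=
  0 ≤ dimensions
instance (data : List String) (cycles : Int) (dimensions : Int) : Decidable (Pre_find_final_state data cycles dimensions) := by unfold Pre_find_final_state; infer_instance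
def pvWitness_find_final_state : List String × Int × Int := (["##.", ".##"], 2, 3)

def Spec_find_final_state (data : List String) (cycles : Int) (dimensions : Int) (out : List (List Int)) : Prop := out = find_final_state_alt data cycles dimensions
instance (data : List String) (cycles : Int) (dimensions : Int) (out : List (List Int)) : Decidable (Spec_find_final_state data cycles dimensions out) := by unfold Spec_find_final_state; infer_instance

-- ===== CLAIM (what is proved, stated in full; the proofs are below) =====
def Claim_equal_find_final_state : Prop := ∀ (data : List String) (cycles : Int) (dimensions : Int), Dom_find_final_state data cycles dimensions → Pre_find_final_state data cycles dimensions → Spec_find_final_state data cycles dimensions (find_final_state data cycles dimensions)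

-- ===== LEMMAS AND PROOFS =====

-- the dict's key view (used only by the proofs)
def PvDict.keys (d : PvDict) : List (List Int) := d.revKeys.reverse

-- negation of a tuple, used only in the proofs (reindexing of the symmetric direction set)
def pvNeg (d : List Int) : List Int := d.map (fun x => -x)

-- the invariant carried across cycles: a grid is duplicate-free and its cells share one common length
def GridInv (g : List (List Int)) : Prop := g.Nodup ∧ ∃ L, ∀ c ∈ g, c.length = L

-- the sequence of all neighbour keys generated by one cycle, in generation order
def pvKeyseq (dirs g : List (List Int)) : List (List Int) := g.flatMap (fun c => dirs.map (pvAdd c))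

-- the number of active neighbours A counts inline for a cell
def cntA (grid dirs : List (List Int)) (c : List Int) : Nat :=
  dirs.countP (fun d => PySem.Set.contains grid (pvAdd c d))

-- the two step functions (the zeta-reduced cycle bodies of the ports)
def stepA (dirs grid : List (List Int)) : List (List Int) :=
  let res := grid.foldl
    (fun (st : PySem.Set (List Int) × PvDict) coords =>
      let r := dirs.foldl
        (fun (p : Int × PvDict) delta =>
          let nb := pvAdd coords delta
          if PySem.Set.contains grid nb then (p.1 + 1, p.2)
          else (p.1, p.2.modify nb 0 (· + 1)))
        ((0 : Int), st.2)
      (if r.1 = 2 ∨ r.1 = 3 then PySem.Set.add st.1 coords else st.1, r.2))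
    (PySem.Set.empty, PvDict.empty)
  res.2.items.foldl (fun ng kv => if kv.2 = 3 then PySem.Set.add ng kv.1 else ng) res.1

def votesDict (dirs grid : List (List Int)) : PvDict :=
  (pyGroupLens ((grid.flatMap (fun c => dirs.map (pvAdd c))).mergeSort lexLe)).foldl
    (fun (d : PvDict) p => d.insert p.1 p.2) PvDict.empty

def stepB (dirs grid : List (List Int)) : List (List Int) :=
  PySem.Set.ofList ((grid.foldl
      (fun (s : PvSet) c =>
        dirs.foldl (fun (s : PvSet) d => PvSet.add s (pvAdd c d)) s)
      (PvSet.ofList grid)).toList.filter (fun k =>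
    (votesDict dirs grid).getD k 0 == 3 ||
    ((votesDict dirs grid).getD k 0 == 2 && PySem.Set.contains grid k)))

theorem foldl_preserve {A B : Type} (Inv : A -> Prop) (g : A -> B -> A)
    (h : ∀ s b, Inv s → Inv (g s b)) :
    ∀ (l : List B) (s : A), Inv s → Inv (l.foldl g s)
  | [], _, hs => hs
  | b :: l, s, hs => foldl_preserve Inv g h l (g s b) (h s b hs)

theorem foldl_congr_inv {A C : Type} (Inv : A -> Prop) (f g : A -> C -> A)
    (h : ∀ s x, Inv s → f s x = g s x ∧ Inv (g s x)) :
    ∀ (l : List C) (s : A), Inv s → l.foldl f s = l.foldl g s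
  | [], _, _ => rfl
  | x :: l, s, hs => by
      obtain ⟨he, hi⟩ := h s x hs
      rw [List.foldl_cons, List.foldl_cons, he, foldl_congr_inv Inv f g h l _ hi]

theorem count_nodup_ite {A : Type} [BEq A] [LawfulBEq A] (g : List A) (h : g.Nodup) (v : A) :
    g.count v = if v ∈ g then 1 else 0 := by
  by_cases hv : v ∈ g
  · have h1 := List.nodup_iff_count_le_one.mp h v
    have h2 := List.count_pos_iff.mpr hv
    simp only [hv, if_true]
    omega
  · simp [List.count_eq_zero.mpr hv, hv]

theorem sum_map_add_nat {A : Type} (l : List A) (f g : A -> Nat) :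
    (l.map (fun x => f x + g x)).sum = (l.map f).sum + (l.map g).sum := by
  induction l with
  | nil => rfl
  | cons x l ih => simp only [List.map_cons, List.sum_cons, ih]; omega

theorem sum_map_ite_count {A : Type} [BEq A] [LawfulBEq A] (g : List A) (w : A) :
    (g.map (fun c => if (c == w) = true then 1 else 0)).sum = g.count w := by
  induction g with
  | nil => rfl
  | cons c g ih =>
    rw [List.map_cons, List.sum_cons, List.count_cons, ih]
    by_cases hc : c = w <;> simp [hc] <;> omega

theorem decide_eq_beq (a b : Int) : decide (a = b) = (a == b) := by
  by_cases h : a = b <;> simp [h]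

-- every element of pvProduct pool n has length n
theorem pvProduct_length (pool : List Int) (n : Nat) (d : List Int)
    (h : d ∈ pvProduct pool n) : d.length = n := by
  induction n generalizing d with
  | zero => simp [pvProduct] at h; simp [h]
  | succ n ih =>
    simp only [pvProduct, List.mem_flatMap, List.mem_map] at h
    obtain ⟨x, -, e, he, rfl⟩ := h
    simp [ih e he]

-- the all-zero tuple occurs exactly once in the direction product
theorem pvProduct_count_zero (n : Nat) :
    (pvProduct [-1, 0, 1] n).count (List.replicate n (0 : Int)) = 1 := by
  induction n with
  | zero => rfl
  | succ n ih =>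
    have hmap : ∀ x : Int, ((pvProduct [-1, 0, 1] n).map (x :: ·)).count
        ((0 : Int) :: List.replicate n (0 : Int)) =
        if x = 0 then (pvProduct [-1, 0, 1] n).count (List.replicate n (0 : Int)) else 0 := by
      intro x
      by_cases hx : x = 0
      · subst hx
        rw [if_pos rfl, List.count_eq_countP, List.count_eq_countP, List.countP_map]
        apply List.countP_congr
        intro d _
        simp [Function.comp]
      · rw [if_neg hx]
        apply List.count_eq_zero.mpr
        intro hmem
        rcases List.mem_map.mp hmem with ⟨d, -, hd⟩
        exact hx (List.cons_eq_cons.mp hd).1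
    simp only [pvProduct, List.replicate_succ]
    show (([(-1 : Int), 0, 1]).flatMap fun x => (pvProduct [-1, 0, 1] n).map (x :: ·)).count _ = 1
    simp only [List.flatMap_cons, List.flatMap_nil, List.append_nil, List.count_append]
    rw [hmap (-1), hmap 0, hmap 1]
    simp [ih]

-- the direction product is closed (as a multiset) under tuple negation
theorem pvProduct_neg_perm (n : Nat) :
    ((pvProduct [-1, 0, 1] n).map pvNeg).Perm (pvProduct [-1, 0, 1] n) := by
  induction n with
  | zero => simp [pvProduct, pvNeg]
  | succ n ih =>
    have key : ∀ x y : Int, y = -x →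
        (((pvProduct [-1, 0, 1] n).map (x :: ·)).map pvNeg).Perm
        ((pvProduct [-1, 0, 1] n).map (y :: ·)) := by
      intro x y hy
      rw [List.map_map]
      have he : (pvNeg ∘ (x :: ·)) = ((fun d => (y :: d)) ∘ pvNeg) := by
        funext d; simp [pvNeg, Function.comp, hy]
      rw [he, ← List.map_map]
      exact ih.map _
    have swap3 : ∀ (X Y Z : List (List Int)), ((X ++ Y) ++ Z).Perm ((Z ++ Y) ++ X) := by
      intro X Y Z
      refine List.perm_append_comm.trans ?_
      refine (List.Perm.append_left Z List.perm_append_comm).trans ?_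
      rw [← List.append_assoc]
    show ((([(-1 : Int), 0, 1]).flatMap fun x => (pvProduct [-1, 0, 1] n).map (x :: ·)).map pvNeg).Perm
        (([(-1 : Int), 0, 1]).flatMap fun x => (pvProduct [-1, 0, 1] n).map (x :: ·))
    simp only [List.flatMap_cons, List.flatMap_nil, List.append_nil, List.map_append,
      ← List.append_assoc]
    have h1 := key (-1) 1 (by norm_num)
    have h0 := key 0 0 (by norm_num)
    have h2 := key 1 (-1) (by norm_num)
    exact ((h1.append h0).append h2).trans (swap3 _ _ _)

theorem remove?_of_count_one {A : Type} [BEq A] [LawfulBEq A] (l : List A) (x : A)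
    (h : l.count x = 1) : PySem.List.remove? l x = some (l.filter (fun y => !(y == x))) := by
  induction l with
  | nil => simp at h
  | cons y l ih =>
    by_cases hy : y = x
    · rw [hy] at h ⊢
      rw [List.count_cons_self] at h
      have hx : x ∉ l := List.count_eq_zero.mp (by omega)
      rw [PySem.List.remove?_cons_self]
      have hf : l.filter (fun z => !(z == x)) = l := by
        apply List.filter_eq_self.mpr
        intro a ha
        have hne : (a == x) = false := by
          rw [beq_eq_false_iff_ne]
          intro e
          exact hx (e ▸ ha)
        simp [hne]
      simp [hf]
    · rw [List.count_cons_of_ne hy] at h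
      rw [PySem.List.remove?_cons_of_ne _ hy, ih h]
      simp [hy]

-- A's direction list (remove of the unique zero tuple) IS B's (filter on any-nonzero)
theorem dirs_eq (n : Nat) :
    (match PySem.List.remove? (pvProduct [-1, 0, 1] n) (List.replicate n (0 : Int)) with
      | some l => l
      | none => []) =
    (pvProduct [-1, 0, 1] n).filter (fun d => d.any (fun x => !(x == 0))) := by
  rw [remove?_of_count_one _ _ (pvProduct_count_zero n)]
  show List.filter _ _ = _
  apply List.filter_congr
  intro d hd
  have hlen := pvProduct_length _ _ _ hd
  by_cases hz : d = List.replicate n (0 : Int)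
  · subst hz
    simp
  · have h1 : (!(d == List.replicate n (0 : Int))) = true := by
      simp [hz]
    rw [h1]
    symm
    rw [List.any_eq_true]
    by_contra hno
    push_neg at hno
    exact hz (List.eq_replicate_iff.mpr ⟨hlen, fun b hb => by
      have := hno b hb
      simpa using this⟩)

-- length of a truncating pointwise sum
theorem pvAdd_length (c d : List Int) : (pvAdd c d).length = min c.length d.length :=
  List.length_zipWith

theorem pvAdd_neg (c d : List Int) : pvAdd c (pvNeg d) = List.zipWith (· - ·) c d := by
  unfold pvAdd pvNeg
  rw [List.zipWith_map_right]
  simp [sub_eq_add_neg]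

-- solving "c' + d = c" for the unique preimage c' (tuples at least as long as the cells)
theorem pvAdd_eq_iff (c : List Int) : ∀ (c' d : List Int), c'.length = c.length →
    c.length ≤ d.length → (pvAdd c' d = c ↔ c' = List.zipWith (· - ·) c d) := by
  induction c with
  | nil =>
    intro c' d h1 _
    rw [List.length_eq_zero_iff.mp h1]
    simp [pvAdd]
  | cons a c ih =>
    intro c' d h1 h2
    cases c' with
    | nil => simp at h1
    | cons a' c' =>
      cases d with
      | nil => simp at h2
      | cons b d =>
        show ((a' + b) :: pvAdd c' d = a :: c) ↔ (a' :: c' = (a - b) :: List.zipWith (· - ·) c d)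
        rw [List.cons_eq_cons, List.cons_eq_cons]
        exact and_congr (by omega)
          (ih c' d (by simpa using h1) (by simpa using h2))

-- double-counting swap: summing per-cell indicator counts over a duplicate-free grid
theorem swap_count (g : List (List Int)) (hnd : g.Nodup) (w : List Int → List Int) :
    ∀ ds : List (List Int),
      (g.map (fun c' => ds.countP (fun d => c' == w d))).sum
        = ds.countP (fun d => decide (w d ∈ g))
  | [] => by simp
  | d :: ds => by
    simp only [List.countP_cons]
    rw [sum_map_add_nat g (fun c' => ds.countP (fun x => c' == w x))
        (fun c' => if (c' == w d) = true then 1 else 0),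
      swap_count g hnd w ds, sum_map_ite_count g (w d), count_nodup_ite g hnd (w d)]
    by_cases hm : w d ∈ g <;> simp [hm]

-- key degenerate fact: a cell strictly longer than the direction tuples is never generated
theorem count_keyseq_zero (n : Nat) (dirs : List (List Int))
    (hdl : ∀ d ∈ dirs, d.length = n) (grid : List (List Int)) (L : Nat)
    (hL : ∀ c ∈ grid, c.length = L) (c : List Int) (hc : c.length = L) (hnL : n < L) :
    (pvKeyseq dirs grid).count c = 0 := by
  apply List.count_eq_zero.mpr
  intro hmem
  rw [pvKeyseq, List.mem_flatMap] at hmem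
  obtain ⟨c', hc', hm⟩ := hmem
  rcases List.mem_map.mp hm with ⟨d, hd, he⟩
  have h := pvAdd_length c' d
  rw [he, hc, hL c' hc', hdl d hd] at h
  omega

-- THE symmetry step: the number of votes a cell receives equals its active-neighbour count
theorem count_keyseq (n : Nat) (dirs : List (List Int))
    (hdl : ∀ d ∈ dirs, d.length = n) (hperm : (dirs.map pvNeg).Perm dirs)
    (grid : List (List Int)) (hnd : grid.Nodup) (L : Nat) (hL : ∀ c ∈ grid, c.length = L)
    (c : List Int) (hc : c.length = L) :
    (pvKeyseq dirs grid).count c = cntA grid dirs c := by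
  by_cases hLn : L ≤ n
  · rw [pvKeyseq, List.count_flatMap]
    have e1 : (grid.map (List.count c ∘ fun c' => dirs.map (pvAdd c'))).sum
        = (grid.map (fun c' => dirs.countP (fun d => c' == List.zipWith (· - ·) c d))).sum := by
      congr 1
      apply List.map_congr_left
      intro c' hc'
      simp only [Function.comp]
      rw [List.count_eq_countP, List.countP_map]
      apply List.countP_congr
      intro d hd
      show (((fun x => x == c) ∘ pvAdd c') d) = true ↔ (c' == List.zipWith (· - ·) c d) = true
      simp only [Function.comp, beq_iff_eq]
      exact pvAdd_eq_iff c c' d (by rw [hL c' hc', hc]) (by rw [hc, hdl d hd]; exact hLn)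
    rw [e1, swap_count grid hnd _ dirs]
    have e2 : ∀ d ∈ dirs, (decide (List.zipWith (· - ·) c d ∈ grid)) = true
        ↔ PySem.Set.contains grid (pvAdd c (pvNeg d)) = true := by
      intro d _
      rw [pvAdd_neg]
      simp [PySem.Set.contains_iff]
    rw [List.countP_congr e2]
    unfold cntA
    have e3 : dirs.countP (fun d => PySem.Set.contains grid (pvAdd c (pvNeg d)))
        = (dirs.map pvNeg).countP (fun d => PySem.Set.contains grid (pvAdd c d)) := by
      rw [List.countP_map]
      rfl
    rw [e3]
    exact List.Perm.countP_eq _ hperm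
  · rw [count_keyseq_zero n dirs hdl grid L hL c hc (by omega)]
    symm
    rw [cntA, List.countP_eq_zero]
    intro d hd hcont
    have hmem := (PySem.Set.contains_iff grid (pvAdd c d)).mp hcont
    have h := pvAdd_length c d
    rw [hL _ hmem, hc, hdl d hd] at h
    omega

-- A's inner loop over the directions, split into its two independent components
theorem innerA (grid : List (List Int)) (coords : List Int) :
    ∀ (dirs : List (List Int)) (a : Int) (d0 : PvDict),
    dirs.foldl
        (fun (p : Int × PvDict) delta =>
          let nb := pvAdd coords delta
          if PySem.Set.contains grid nb then (p.1 + 1, p.2)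
          else (p.1, p.2.modify nb 0 (· + 1)))
        (a, d0)
      = (a + (cntA grid dirs coords : Int),
         ((dirs.map (pvAdd coords)).filter (fun k => !(PySem.Set.contains grid k))).foldl
           (fun d k => d.modify k 0 (· + 1)) d0)
  | [], a, d0 => by simp [cntA]
  | dd :: ds, a, d0 => by
    rw [List.foldl_cons]
    dsimp only
    rw [List.map_cons, List.filter_cons]
    unfold cntA
    rw [List.countP_cons]
    by_cases hc : PySem.Set.contains grid (pvAdd coords dd) = true
    · rw [if_pos hc, innerA grid coords ds (a + 1) d0, hc]
      simp only [Bool.not_true, Bool.false_eq_true, if_false, if_true]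
      rw [Prod.mk.injEq]
      refine ⟨by unfold cntA; push_cast; ring, rfl⟩
    · have hc' : PySem.Set.contains grid (pvAdd coords dd) = false := by
        simpa using hc
      rw [if_neg hc, hc']
      simp only [Bool.not_false, Bool.false_eq_true, if_false, if_true, List.foldl_cons]
      rw [innerA grid coords ds a (d0.modify (pvAdd coords dd) 0 (· + 1))]
      rw [Prod.mk.injEq]
      refine ⟨by unfold cntA; push_cast; ring, rfl⟩

-- A's outer loop over the grid, split into the new-survivor set and the inactives table
theorem outerA (grid dirs : List (List Int)) :
    ∀ (g : List (List Int)) (s0 : PySem.Set (List Int)) (d0 : PvDict),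
    g.foldl
        (fun (st : PySem.Set (List Int) × PvDict) coords =>
          let r := dirs.foldl
            (fun (p : Int × PvDict) delta =>
              let nb := pvAdd coords delta
              if PySem.Set.contains grid nb then (p.1 + 1, p.2)
              else (p.1, p.2.modify nb 0 (· + 1)))
            ((0 : Int), st.2)
          (if r.1 = 2 ∨ r.1 = 3 then PySem.Set.add st.1 coords else st.1, r.2))
        (s0, d0)
      = (g.foldl (fun s c => if ((cntA grid dirs c : Int) = 2 ∨ (cntA grid dirs c : Int) = 3)
            then PySem.Set.add s c else s) s0,
         ((pvKeyseq dirs g).filter (fun k => !(PySem.Set.contains grid k))).foldl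
           (fun d k => d.modify k 0 (· + 1)) d0)
  | [], s0, d0 => by simp [pvKeyseq]
  | c :: g, s0, d0 => by
    rw [List.foldl_cons]
    dsimp only
    rw [innerA grid c dirs 0 d0]
    dsimp only
    simp only [zero_add]
    rw [outerA grid dirs g _ _]
    have hseq : pvKeyseq dirs (c :: g) = dirs.map (pvAdd c) ++ pvKeyseq dirs g := by
      simp [pvKeyseq]
    rw [hseq, List.filter_append, List.foldl_append, List.foldl_cons]

-- the survivors loop (fold of conditional set-inserts over fresh distinct elements) appends
theorem foldl_addIf_eq_filter (p : List Int → Prop) [DecidablePred p] :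
    ∀ (g : List (List Int)) (s0 : PySem.Set (List Int)), g.Nodup → (∀ c ∈ g, c ∉ s0) →
      g.foldl (fun s c => if p c then PySem.Set.add s c else s) s0
        = s0 ++ g.filter (fun c => decide (p c))
  | [], s0, _, _ => by simp
  | c :: g, s0, hnd, hdisj => by
    have hcg : c ∉ g := (List.nodup_cons.mp hnd).1
    have hnd' := (List.nodup_cons.mp hnd).2
    rw [List.foldl_cons, List.filter_cons]
    by_cases hp : p c
    · rw [if_pos hp, PySem.Set.add_of_not_mem (hdisj c List.mem_cons_self)]
      rw [foldl_addIf_eq_filter p g (s0 ++ [c]) hnd' ?_]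
      · simp [hp, List.append_assoc]
      · intro c' hc'
        simp only [List.mem_append, List.mem_singleton]
        rintro (h | rfl)
        · exact hdisj c' (List.mem_cons_of_mem _ hc') h
        · exact hcg hc'
    · rw [if_neg hp,
        foldl_addIf_eq_filter p g s0 hnd' (fun c' hc' => hdisj c' (List.mem_cons_of_mem _ hc'))]
      simp [hp]

-- one counting step of the dict: the looked-up value bumps for the touched key only
theorem pvDict_modify_getD (d : PvDict) (x k : List Int) :
    (d.modify x 0 (· + 1)).getD k 0
      = if x = k then d.getD k 0 + 1 else d.getD k 0 := by
  unfold PvDict.modify PvDict.getD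
  cases hx : d.idx[x]? with
  | some v =>
    simp only []
    rw [Std.HashMap.getD_insert]
    by_cases hxk : x = k
    · subst hxk
      simp [Std.HashMap.getD_eq_getD_getElem?, hx]
    · simp [hxk]
  | none =>
    simp only []
    rw [Std.HashMap.getD_insert]
    by_cases hxk : x = k
    · subst hxk
      simp [Std.HashMap.getD_eq_getD_getElem?, hx]
    · simp [hxk]

-- the index agrees with the key list (the dict's structural invariant, preserved by every step)
def PvDictWF (d : PvDict) : Prop := ∀ k, d.idx[k]? ≠ none ↔ k ∈ d.revKeys

theorem pvDictWF_empty : PvDictWF PvDict.empty := by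
  intro k
  simp [PvDict.empty]

-- a counter-style modify-fold: lookups count occurrences, keys are the first occurrences
theorem modfold_getD_go (k : List Int) :
    ∀ (l : List (List Int)) (d : PvDict),
      (l.foldl (fun (d : PvDict) k' => d.modify k' 0 (· + 1)) d).getD k 0
        = d.getD k 0 + (l.count k : Int)
  | [], d => by simp
  | x :: l, d => by
    rw [List.foldl_cons, modfold_getD_go k l _, pvDict_modify_getD d x k, List.count_cons]
    by_cases hxk : x = k <;> simp [hxk] <;> push_cast <;> ring

theorem modfold_getD (l : List (List Int)) (k : List Int) :
    (l.foldl (fun (d : PvDict) k' => d.modify k' 0 (· + 1))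
        PvDict.empty).getD k 0
      = (l.count k : Int) := by
  rw [modfold_getD_go k l PvDict.empty]
  simp [PvDict.empty, PvDict.getD]

theorem modfold_keys_go :
    ∀ (l : List (List Int)) (d : PvDict), PvDictWF d →
      (l.foldl (fun (d : PvDict) k' => d.modify k' 0 (· + 1)) d).keys
          = PySem.Set.update d.keys l
        ∧ PvDictWF (l.foldl (fun (d : PvDict) k' => d.modify k' 0 (· + 1)) d)
  | [], d, hwf => ⟨by simp [PySem.Set.update], hwf⟩
  | x :: l, d, hwf => by
    rw [List.foldl_cons, PySem.Set.update_cons]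
    have hkeys : (d.modify x 0 (· + 1)).keys = PySem.Set.add d.keys x
        ∧ PvDictWF (d.modify x 0 (· + 1)) := by
      unfold PvDict.modify
      cases hx : d.idx[x]? with
      | some v =>
        have hmem : x ∈ d.revKeys := (hwf x).mp (by simp [hx])
        constructor
        · show d.keys = _
          rw [PySem.Set.add_of_mem (by simpa [PvDict.keys] using hmem)]
        · intro k
          simp only [Std.HashMap.getElem?_insert]
          by_cases hxk : x = k
          · subst hxk
            simp [hmem]
          · simpa [hxk, (beq_eq_false_iff_ne).mpr hxk] using hwf k
      | none =>
        have hmem : x ∉ d.revKeys := fun hm => by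
          have := (hwf x).mpr hm
          exact this hx
        constructor
        · show (x :: d.revKeys).reverse = _
          rw [PySem.Set.add_of_not_mem (by simpa [PvDict.keys] using hmem)]
          simp [PvDict.keys]
        · intro k
          simp only [Std.HashMap.getElem?_insert]
          by_cases hxk : x = k
          · subst hxk
            simp
          · simpa [hxk, (beq_eq_false_iff_ne).mpr hxk, List.mem_cons]
              using (hwf k).trans (by simp [Ne.symm hxk])
    rw [← hkeys.1]
    exact modfold_keys_go l _ hkeys.2

theorem modfold_keys (l : List (List Int)) :
    (l.foldl (fun (d : PvDict) k' => d.modify k' 0 (· + 1))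
        PvDict.empty).keys
      = PySem.Set.ofList l := by
  rw [(modfold_keys_go l PvDict.empty pvDictWF_empty).1]
  rfl

-- building a Python set from a filtered list = filtering the set built from the list
theorem ofList_filter (p : List Int → Bool) (l : List (List Int)) :
    PySem.Set.ofList (l.filter p) = (PySem.Set.ofList l).filter p := by
  induction l using List.reverseRecOn with
  | nil => rfl
  | append_singleton l x ih =>
    rw [List.filter_append, PySem.Set.ofList_append_singleton]
    by_cases hp : p x
    · have hfx : List.filter p [x] = [x] := by simp [hp]
      rw [hfx, PySem.Set.ofList_append_singleton, ih]
      by_cases hm : x ∈ PySem.Set.ofList l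
      · rw [PySem.Set.add_of_mem hm, PySem.Set.add_of_mem (List.mem_filter.mpr ⟨hm, hp⟩)]
      · rw [PySem.Set.add_of_not_mem hm,
          PySem.Set.add_of_not_mem (fun hx => hm (List.mem_filter.mp hx).1),
          List.filter_append]
        simp [hp]
    · have hfx : List.filter p [x] = [] := by simp [hp]
      rw [hfx, List.append_nil, ih]
      by_cases hm : x ∈ PySem.Set.ofList l
      · rw [PySem.Set.add_of_mem hm]
      · rw [PySem.Set.add_of_not_mem hm, List.filter_append]
        simp [hp]

-- the tuple comparator is total, transitive and antisymmetric
theorem lexLe_total : ∀ (a b : List Int), lexLe a b = true ∨ lexLe b a = true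
  | [], _ => Or.inl rfl
  | _ :: _, [] => Or.inr rfl
  | a :: as, b :: bs => by
    by_cases hab : a < b
    · exact Or.inl (by simp [lexLe, hab])
    · by_cases hba : b < a
      · exact Or.inr (by simp [lexLe, hba])
      · have he : a = b := by omega
        subst he
        rcases lexLe_total as bs with h | h
        · exact Or.inl (by simp [lexLe, h])
        · exact Or.inr (by simp [lexLe, h])

theorem lexLe_trans : ∀ (a b c : List Int),
    lexLe a b = true → lexLe b c = true → lexLe a c = true
  | [], _, _, _, _ => rfl
  | _ :: _, [], _, h1, _ => by simp [lexLe] at h1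
  | _ :: _, _ :: _, [], _, h2 => by simp [lexLe] at h2
  | a :: as, b :: bs, c :: cs, h1, h2 => by
    simp only [lexLe, Bool.or_eq_true, Bool.and_eq_true, decide_eq_true_eq, beq_iff_eq] at h1 h2 ⊢
    rcases h1 with h1 | ⟨rfl, h1⟩
    · rcases h2 with h2 | ⟨rfl, h2⟩
      · exact Or.inl (by omega)
      · exact Or.inl h1
    · rcases h2 with h2 | ⟨rfl, h2⟩
      · exact Or.inl h2
      · exact Or.inr ⟨rfl, lexLe_trans as bs cs h1 h2⟩

theorem lexLe_antisymm : ∀ (a b : List Int),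
    lexLe a b = true → lexLe b a = true → a = b
  | [], [], _, _ => rfl
  | [], _ :: _, _, h2 => by simp [lexLe] at h2
  | _ :: _, [], h1, _ => by simp [lexLe] at h1
  | a :: as, b :: bs, h1, h2 => by
    simp only [lexLe, Bool.or_eq_true, Bool.and_eq_true, decide_eq_true_eq, beq_iff_eq] at h1 h2
    rcases h1 with h1 | ⟨rfl, h1⟩
    · rcases h2 with h2 | ⟨he, _⟩
      · omega
      · omega
    · rcases h2 with h2 | ⟨-, h2⟩
      · omega
      · rw [lexLe_antisymm as bs h1 h2]

-- a run's head never reappears after the run, in a lexLe-sorted tail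
theorem not_mem_dropWhile_beq (x : List Int) :
    ∀ (xs : List (List Int)), (∀ y ∈ xs, lexLe x y = true) →
      xs.Pairwise (fun a b => lexLe a b = true) →
      x ∉ xs.dropWhile (fun y => y == x)
  | [], _, _ => by simp
  | y :: ys, hall, hpw => by
    by_cases hy : (y == x) = true
    · have hd : List.dropWhile (fun y => y == x) (y :: ys)
          = List.dropWhile (fun y => y == x) ys := by
        simp [List.dropWhile_cons, hy]
      rw [hd]
      exact not_mem_dropWhile_beq x ys (fun z hz => hall z (List.mem_cons_of_mem _ hz))
        (List.Pairwise.sublist (List.sublist_cons_self _ _) hpw)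
    · have hy' : (y == x) = false := by simpa using hy
      have hd : List.dropWhile (fun y => y == x) (y :: ys) = y :: ys := by
        simp [List.dropWhile_cons, hy']
      rw [hd]
      intro hmem
      have hyx : y ≠ x := by simpa using hy
      rcases List.mem_cons.mp hmem with rfl | hmem'
      · exact hyx rfl
      · have h1 : lexLe y x = true := (List.pairwise_cons.mp hpw).1 x hmem'
        have h2 : lexLe x y = true := hall y List.mem_cons_self
        exact hyx (lexLe_antisymm y x h1 h2)

-- the accumulator of the tail-recursive groupby is a prefix in reverse
theorem pyGroupLensAux_acc :
    ∀ (l : List (List Int)) (acc : List (List Int × Int)),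
      pyGroupLensAux l acc = acc.reverse ++ pyGroupLensAux l []
  | [], acc => by simp [pyGroupLensAux]
  | x :: xs, acc => by
    rw [pyGroupLensAux, pyGroupLensAux,
      pyGroupLensAux_acc (xs.dropWhile (fun y => y == x)) _,
      pyGroupLensAux_acc (xs.dropWhile (fun y => y == x)) [(x, _)]]
    simp
  termination_by l => l.length
  decreasing_by
    all_goals
      simp only [List.length_cons]
      exact Nat.lt_succ_of_le (List.length_dropWhile_le _ _)

theorem pyGroupLens_nil : pyGroupLens [] = [] := by
  unfold pyGroupLens
  rw [pyGroupLensAux]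
  rfl

theorem pyGroupLens_cons (x : List Int) (xs : List (List Int)) :
    pyGroupLens (x :: xs)
      = (x, 1 + ((xs.takeWhile (fun y => y == x)).length : Int))
          :: pyGroupLens (xs.dropWhile (fun y => y == x)) := by
  unfold pyGroupLens
  rw [pyGroupLensAux, pyGroupLensAux_acc]
  simp

-- inserting into the dict bumps the looked-up value for the touched key only
theorem pvDict_insert_getD (d : PvDict) (x k : List Int) (v : Int) :
    (d.insert x v).getD k 0 = if k = x then v else d.getD k 0 := by
  unfold PvDict.insert PvDict.getD
  cases hx : d.idx[x]? with
  | some w =>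
    simp only []
    rw [Std.HashMap.getD_insert]
    by_cases hxk : x = k
    · subst hxk
      simp
    · simp [hxk, Ne.symm hxk]
  | none =>
    simp only []
    rw [Std.HashMap.getD_insert]
    by_cases hxk : x = k
    · subst hxk
      simp
    · simp [hxk, Ne.symm hxk]

-- the dict built from the collapsed runs of a sorted list looks up the list count
theorem groupLens_getD (k : List Int) :
    ∀ (l : List (List Int)), l.Pairwise (fun a b => lexLe a b = true) →
      ∀ (d : PvDict),
        ((pyGroupLens l).foldl (fun d p => PvDict.insert d p.1 p.2) d).getD k 0
          = if k ∈ l then (l.count k : Int) else d.getD k 0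
  | [], _, d => by simp [pyGroupLens_nil]
  | x :: xs, hpw, d => by
    obtain ⟨hall, hpxs⟩ := List.pairwise_cons.mp hpw
    have hsplit := List.takeWhile_append_dropWhile (p := fun y => y == x) (l := xs)
    have hr : ∀ y ∈ xs.takeWhile (fun y => y == x), y = x := by
      intro y hy
      simpa using List.mem_takeWhile_imp hy
    have hrest_pw : (xs.dropWhile (fun y => y == x)).Pairwise
        (fun a b => lexLe a b = true) :=
      List.Pairwise.sublist (List.dropWhile_sublist _) hpxs
    have hxrest : x ∉ xs.dropWhile (fun y => y == x) :=
      not_mem_dropWhile_beq x xs hall hpxs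
    rw [pyGroupLens_cons]
    simp only [List.foldl_cons]
    rw [groupLens_getD k (xs.dropWhile (fun y => y == x)) hrest_pw _]
    have hcxs : xs.count k
        = (xs.takeWhile (fun y => y == x)).count k
            + (xs.dropWhile (fun y => y == x)).count k := by
      conv_lhs => rw [← hsplit]
      exact List.count_append ..
    by_cases hmem : k ∈ xs.dropWhile (fun y => y == x)
    · have hkx : k ≠ x := fun he => hxrest (he ▸ hmem)
      have hkr : (xs.takeWhile (fun y => y == x)).count k = 0 :=
        List.count_eq_zero.mpr (fun hk => hkx (hr k hk))
      have hkl : k ∈ x :: xs := by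
        refine List.mem_cons_of_mem _ ?_
        rw [← hsplit]
        exact List.mem_append_right _ hmem
      rw [if_pos hmem, if_pos hkl, List.count_cons_of_ne (Ne.symm hkx), hcxs, hkr]
      push_cast
      ring
    · rw [if_neg hmem]
      by_cases hkx : k = x
      · subst hkx
        have hkr : (xs.takeWhile (fun y => y == k)).count k
            = (xs.takeWhile (fun y => y == k)).length := by
          rw [List.count_eq_length]
          intro b hb
          simp [hr b hb]
        have hkrest : (xs.dropWhile (fun y => y == k)).count k = 0 :=
          List.count_eq_zero.mpr hxrest
        rw [if_pos List.mem_cons_self, pvDict_insert_getD, if_pos rfl,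
          List.count_cons_self, hcxs, hkr, hkrest]
        push_cast
        ring
      · have hknr : k ∉ xs.takeWhile (fun y => y == x) :=
          fun hk => hkx (hr k hk)
        have hkl : k ∉ x :: xs := by
          intro hk
          rcases List.mem_cons.mp hk with rfl | hk'
          · exact hkx rfl
          · rw [← hsplit] at hk'
            rcases List.mem_append.mp hk' with h | h
            · exact hknr h
            · exact hmem h
        rw [if_neg hkl, pvDict_insert_getD, if_neg hkx]
  termination_by l => l.length
  decreasing_by
    simp only [List.length_cons]
    exact Nat.lt_succ_of_le (List.length_dropWhile_le _ _)

-- B's vote dict looks up the number of votes a key receives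
theorem votesDict_getD (dirs grid : List (List Int)) (k : List Int) :
    (votesDict dirs grid).getD k 0 = ((pvKeyseq dirs grid).count k : Int) := by
  unfold votesDict
  rw [groupLens_getD k _ (List.pairwise_mergeSort lexLe_trans
    (fun a b => by rcases lexLe_total a b with h | h <;> simp [h]) _)]
  have hperm := List.mergeSort_perm (grid.flatMap (fun c => dirs.map (pvAdd c))) lexLe
  have hcnt : ((grid.flatMap (fun c => dirs.map (pvAdd c))).mergeSort lexLe).count k
      = (pvKeyseq dirs grid).count k := hperm.count_eq k
  by_cases hmem : k ∈ (grid.flatMap (fun c => dirs.map (pvAdd c))).mergeSort lexLe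
  · rw [if_pos hmem, hcnt]
  · rw [if_neg hmem]
    have he : PvDict.getD PvDict.empty k 0 = 0 := by
      simp [PvDict.empty, PvDict.getD]
    rw [he]
    have h0 : (pvKeyseq dirs grid).count k = 0 := by
      rw [← hcnt]
      exact List.count_eq_zero.mpr hmem
    simp [h0]

-- the hash index agrees with the element list (the set's structural invariant)
def PvSetWF (s : PvSet) : Prop := ∀ k, s.idx[k]? ≠ none ↔ k ∈ s.revElems

-- one add of the hash-indexed set is one add of the Python set
theorem pvSet_add_bridge (s : PvSet) (hwf : PvSetWF s) (x : List Int) :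
    (s.add x).toList = PySem.Set.add s.toList x ∧ PvSetWF (s.add x) := by
  unfold PvSet.add
  cases hx : s.idx[x]? with
  | some u =>
    have hmem : x ∈ s.revElems := (hwf x).mp (by simp [hx])
    refine ⟨?_, hwf⟩
    show s.toList = _
    rw [PySem.Set.add_of_mem (by simpa [PvSet.toList] using hmem)]
  | none =>
    have hnm : x ∉ s.revElems := fun hm => (hwf x).mpr hm hx
    constructor
    · show (x :: s.revElems).reverse = _
      rw [PySem.Set.add_of_not_mem (by simpa [PvSet.toList] using hnm)]
      simp [PvSet.toList]
    · intro k
      simp only [Std.HashMap.getElem?_insert]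
      by_cases hxk : x = k
      · subst hxk
        simp
      · simpa [hxk, (beq_eq_false_iff_ne).mpr hxk, List.mem_cons]
          using (hwf k).trans (by simp [Ne.symm hxk])

-- a fold of adds over the hash-indexed set is the Python set's update
theorem pvSet_fold_bridge :
    ∀ (l : List (List Int)) (s : PvSet), PvSetWF s →
      (l.foldl (fun s k => PvSet.add s k) s).toList = PySem.Set.update s.toList l
        ∧ PvSetWF (l.foldl (fun s k => PvSet.add s k) s)
  | [], s, hwf => ⟨by simp [PySem.Set.update], hwf⟩
  | x :: l, s, hwf => by
    rw [List.foldl_cons, PySem.Set.update_cons]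
    obtain ⟨h1, h2⟩ := pvSet_add_bridge s hwf x
    rw [← h1]
    exact pvSet_fold_bridge l _ h2

theorem pvSetWF_empty : PvSetWF ⟨[], ∅⟩ := by
  intro k
  simp

-- the seeded candidate set: same elements, same order, as the Python set of the grid
theorem pvSet_ofList_bridge (l : List (List Int)) :
    (PvSet.ofList l).toList = PySem.Set.ofList l ∧ PvSetWF (PvSet.ofList l) :=
  pvSet_fold_bridge l ⟨[], ∅⟩ pvSetWF_empty

-- B's candidate loop builds exactly the update of the grid set by the vote key sequence
theorem cands_eq (dirs : List (List Int)) (g : List (List Int)) (s : PvSet) :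
    g.foldl (fun (s : PvSet) c =>
        dirs.foldl (fun (s : PvSet) d => PvSet.add s (pvAdd c d)) s) s
      = (pvKeyseq dirs g).foldl (fun s k => PvSet.add s k) s := by
  rw [pvKeyseq, List.foldl_flatMap]
  simp only [List.foldl_map]

-- B's step body, written as one flat list: survivors (grid order) ++ births (first-vote order)
theorem stepB_parts (dirs grid : List (List Int)) (hnd : grid.Nodup) :
    stepB dirs grid
      = grid.filter (fun k =>
            (votesDict dirs grid).getD k 0 == 3 ||
            ((votesDict dirs grid).getD k 0 == 2 && PySem.Set.contains grid k))
        ++ (PySem.Set.ofList ((pvKeyseq dirs grid).filter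
              (fun k => !(PySem.Set.contains grid k)))).filter
            (fun k =>
              (votesDict dirs grid).getD k 0 == 3 ||
              ((votesDict dirs grid).getD k 0 == 2 && PySem.Set.contains grid k)) := by
  unfold stepB
  obtain ⟨hof, hwf⟩ := pvSet_ofList_bridge grid
  rw [cands_eq dirs grid (PvSet.ofList grid),
    (pvSet_fold_bridge (pvKeyseq dirs grid) (PvSet.ofList grid) hwf).1, hof,
    PySem.Set.ofList_eq_self_of_nodup grid hnd,
    PySem.Set.update_eq_append_filter, ← ofList_filter, List.filter_append]
  set p : List Int → Bool := fun k =>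
    (votesDict dirs grid).getD k 0 == 3 ||
      ((votesDict dirs grid).getD k 0 == 2 && PySem.Set.contains grid k) with hp
  apply PySem.Set.ofList_eq_self_of_nodup
  apply List.Nodup.append (hnd.filter p) ((PySem.Set.nodup_ofList _).filter p)
  intro x hx1 hx2
  have h2 := (List.mem_filter.mp ((PySem.Set.mem_ofList _ _).mp
    (List.mem_of_mem_filter hx2))).2
  rw [(PySem.Set.contains_iff grid x).mpr (List.mem_filter.mp hx1).1] at h2
  simp at h2

-- the A cycle body equals the B cycle body on an invariant grid
theorem stepA_eq_stepB (n : Nat) (dirs : List (List Int))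
    (hdl : ∀ d ∈ dirs, d.length = n) (hperm : (dirs.map pvNeg).Perm dirs)
    (grid : List (List Int)) (hInv : GridInv grid) :
    stepA dirs grid = stepB dirs grid := by
  obtain ⟨hnd, L, hL⟩ := hInv
  unfold stepA
  simp only [outerA grid dirs grid PySem.Set.empty PvDict.empty]
  set fseq := (pvKeyseq dirs grid).filter (fun k => !(PySem.Set.contains grid k)) with hfseq
  -- the inactives dict: its items are its (duplicate-free, off-grid) keys paired with their counts
  have hkeysI := modfold_keys fseq
  have hitems : (fseq.foldl (fun (d : PvDict) k => d.modify k 0 (· + 1)) PvDict.empty).items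
      = ((fseq.foldl (fun (d : PvDict) k => d.modify k 0 (· + 1)) PvDict.empty).keys).map
          (fun k => (k, (fseq.foldl (fun (d : PvDict) k => d.modify k 0 (· + 1))
            PvDict.empty).getD k 0)) := rfl
  rw [hkeysI] at hitems
  rw [hitems, List.foldl_map]
  -- survivors = filter of the grid
  rw [foldl_addIf_eq_filter _ grid PySem.Set.empty hnd (fun c _ => List.not_mem_nil)]
  show (PySem.Set.ofList fseq).foldl _ ([] ++ _) = _
  rw [List.nil_append]
  -- births appended after the survivors
  rw [foldl_addIf_eq_filter
      (fun k => (fseq.foldl (fun (d : PvDict) k' => d.modify k' 0 (· + 1))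
          PvDict.empty).getD k 0 = 3)
      (PySem.Set.ofList fseq) _ (PySem.Set.nodup_ofList _) ?hdisj]
  case hdisj =>
    intro c hc hcs
    have h1 : PySem.Set.contains grid c = false := by
      have h2 := (List.mem_filter.mp ((PySem.Set.mem_ofList fseq c).mp hc)).2
      simpa using h2
    rw [(PySem.Set.contains_iff grid c).mpr
      (List.mem_filter.mp hcs).1] at h1
    simp at h1
  rw [stepB_parts dirs grid hnd]
  congr 1
  · -- survivors agree cell by cell (the symmetry argument)
    apply List.filter_congr
    intro c hcg
    rw [votesDict_getD dirs grid c,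
      count_keyseq n dirs hdl hperm grid hnd L hL c (hL c hcg),
      (PySem.Set.contains_iff grid c).mpr hcg]
    by_cases h2 : (cntA grid dirs c : Int) = 2 <;>
      by_cases h3 : (cntA grid dirs c : Int) = 3 <;>
        simp [h2, h3]
  · -- births agree key by key
    apply List.filter_congr
    intro k hk
    have hnm : k ∉ grid := by
      have h2 := (List.mem_filter.mp ((PySem.Set.mem_ofList fseq k).mp hk)).2
      intro hg
      rw [(PySem.Set.contains_iff grid k).mpr hg] at h2
      simp at h2
    have hcont : PySem.Set.contains grid k = false := by
      by_contra hc
      exact hnm ((PySem.Set.contains_iff grid k).mp (by simpa using hc))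
    have hcnt : fseq.count k = (pvKeyseq dirs grid).count k := by
      rw [hfseq]
      exact List.count_filter (by simpa using hnm)
    rw [modfold_getD, votesDict_getD dirs grid k, hcnt, hcont, decide_eq_beq]
    simp

-- the B cycle body preserves the invariant
theorem stepB_inv (n : Nat) (dirs : List (List Int))
    (hdl : ∀ d ∈ dirs, d.length = n)
    (grid : List (List Int)) (hInv : GridInv grid) :
    GridInv (stepB dirs grid) := by
  obtain ⟨hnd, L, hL⟩ := hInv
  rw [stepB_parts dirs grid hnd]
  set p : List Int → Bool := fun k =>
    (votesDict dirs grid).getD k 0 == 3 ||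
      ((votesDict dirs grid).getD k 0 == 2 && PySem.Set.contains grid k) with hp
  set fseq := (pvKeyseq dirs grid).filter (fun k => !(PySem.Set.contains grid k)) with hfseq
  constructor
  · apply List.Nodup.append (hnd.filter p) ((PySem.Set.nodup_ofList _).filter p)
    intro x hx1 hx2
    have h2 := (List.mem_filter.mp ((PySem.Set.mem_ofList _ _).mp
      (List.mem_of_mem_filter hx2))).2
    rw [(PySem.Set.contains_iff grid x).mpr (List.mem_filter.mp hx1).1] at h2
    simp at h2
  · have hbirth : ∀ c ∈ (PySem.Set.ofList fseq).filter p, c.length = min L n := by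
      intro c hc
      have hmem := (PySem.Set.mem_ofList _ _).mp (List.mem_of_mem_filter hc)
      have hmem2 := List.mem_of_mem_filter hmem
      rw [pvKeyseq, List.mem_flatMap] at hmem2
      obtain ⟨c', hc', hm⟩ := hmem2
      rcases List.mem_map.mp hm with ⟨d, hd, he⟩
      rw [← he, pvAdd_length, hL c' hc', hdl d hd]
    by_cases hLn : L ≤ n
    · refine ⟨L, fun c hc => ?_⟩
      rcases List.mem_append.mp hc with h | h
      · exact hL c (List.mem_filter.mp h).1
      · rw [hbirth c h]; omega
    · -- cells longer than the direction tuples receive no votes: there are no survivors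
      have hnone : grid.filter p = [] := by
        rw [List.filter_eq_nil_iff]
        intro c hcg
        rw [hp]
        beta_reduce
        rw [votesDict_getD dirs grid c,
          count_keyseq_zero n dirs hdl grid L hL c (hL c hcg) (by omega)]
        simp
      refine ⟨min L n, fun c hc => ?_⟩
      rcases List.mem_append.mp hc with h | h
      · rw [hnone] at h
        exact absurd h List.not_mem_nil
      · exact hbirth c h

-- the direction set used by both ports is negation-closed as a multiset
theorem dirs_neg_perm (n : Nat) :
    (((pvProduct [-1, 0, 1] n).filter (fun d => d.any (fun x => !(x == 0)))).map pvNeg).Perm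
    ((pvProduct [-1, 0, 1] n).filter (fun d => d.any (fun x => !(x == 0)))) := by
  have hcomm : ((pvProduct [-1, 0, 1] n).filter (fun d => d.any (fun x => !(x == 0)))).map pvNeg
      = ((pvProduct [-1, 0, 1] n).map pvNeg).filter (fun d => d.any (fun x => !(x == 0))) := by
    rw [List.filter_map]
    congr 1
    apply List.filter_congr
    intro d _
    show d.any (fun x => !(x == 0)) = ((fun d => d.any (fun x => !(x == 0))) ∘ pvNeg) d
    simp only [Function.comp, pvNeg, List.any_map]
    have hfun : ((fun x : Int => !(x == 0)) ∘ (fun x : Int => -x)) = (fun x : Int => !(x == 0)) := by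
      funext x
      by_cases hx : x = 0 <;> simp [Function.comp, hx, neg_eq_zero]
    rw [hfun]
  rw [hcomm]
  exact (pvProduct_neg_perm n).filter _

-- the parsed initial grid satisfies the invariant
theorem parse_inv (data : List String) (dims : Int) : GridInv (parse_state data dims) := by
  suffices h : (parse_state data dims).Nodup
      ∧ ∀ c ∈ parse_state data dims, c.length = 2 + (dims - 2).toNat by
    exact ⟨h.1, 2 + (dims - 2).toNat, h.2⟩
  unfold parse_state
  apply foldl_preserve
    (fun (s : PySem.Set (List Int)) => s.Nodup ∧ ∀ c ∈ s, c.length = 2 + (dims - 2).toNat)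
  · intro s p hs
    apply foldl_preserve
      (fun (s : PySem.Set (List Int)) => s.Nodup ∧ ∀ c ∈ s, c.length = 2 + (dims - 2).toNat)
    · intro s q hs
      beta_reduce
      by_cases hq : q.2 = '#'
      · rw [if_pos hq]
        refine ⟨PySem.Set.nodup_add _ _ hs.1, fun c hc => ?_⟩
        rcases (PySem.Set.mem_add _ _ _).mp hc with h | rfl
        · exact hs.2 c h
        · simp
          omega
      · rw [if_neg hq]
        exact hs
    · exact hs
  · exact ⟨List.nodup_nil, fun c hc => absurd hc List.not_mem_nil⟩

-- ===== VERDICT (by name: the statement is the Claim_ definition above) =====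
theorem find_final_state_spec : Claim_equal_find_final_state := by
  intro data cycles dims _ _
  show find_final_state data cycles dims = find_final_state_alt data cycles dims
  unfold find_final_state find_final_state_alt
  rw [dirs_eq dims.toNat]
  exact foldl_congr_inv GridInv _ _
    (fun g _ hg =>
      ⟨stepA_eq_stepB dims.toNat _
          (fun d hd => pvProduct_length _ _ _ (List.mem_filter.mp hd).1)
          (dirs_neg_perm dims.toNat) g hg,
        stepB_inv dims.toNat _
          (fun d hd => pvProduct_length _ _ _ (List.mem_filter.mp hd).1) g hg⟩)
    (PySem.List.pyRange 0 cycles 1) _ (parse_inv data dims)
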